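-- pv_equiv track=rewrite | github.com/lpmwfx/Rules | tools/register_parse.py | extract_subtitle
-- ===== SOURCE A (Python) =====
-- def extract_subtitle(lines: list[str]) -> str:
--     """First blockquote after H1."""
--     found_h1 = False
--     parts: list[str] = []
--     for line in lines:
--         if not found_h1 and line.startswith("# "):
--             found_h1 = True
--             continue
--         if found_h1:
--             if line.startswith("> "):
--                 parts.append(line[2:].strip())
--             elif parts:
--                 break
--             elif line.strip() == "":
--                 continue
--             else:
--                 break
--     return " ".join(parts)
-- ===== SOURCE B (Python) =====
-- def extract_subtitle(lines: list[str]) -> str: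
--     """First blockquote after H1 (two-phase: find H1, then drop blanks / take quotes)."""
--     rest = _after_h1(lines)
--     if rest is None:
--         return ""
--     i = 0
--     while i < len(rest) and rest[i].strip() == "":
--         i += 1
--     parts = []
--     while i < len(rest) and rest[i].startswith("> "):
--         parts.append(rest[i][2:].strip())
--         i += 1
--     return " ".join(parts)
--
--
-- def _after_h1(lines):
--     for k, line in enumerate(lines):
--         if line.startswith("# "):
--             return lines[k + 1:]
--     return None
-- ===== Notes on version B (the rewrite author's own statement) =====
-- stated objective: simpler
-- what changed: Replaced the single running-flag state-machine loop over all lines with a two-phase decomposition: first find the line after the first H1, then skip leading blanks and collect the contiguous '> ' run.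
import Mathlib
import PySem

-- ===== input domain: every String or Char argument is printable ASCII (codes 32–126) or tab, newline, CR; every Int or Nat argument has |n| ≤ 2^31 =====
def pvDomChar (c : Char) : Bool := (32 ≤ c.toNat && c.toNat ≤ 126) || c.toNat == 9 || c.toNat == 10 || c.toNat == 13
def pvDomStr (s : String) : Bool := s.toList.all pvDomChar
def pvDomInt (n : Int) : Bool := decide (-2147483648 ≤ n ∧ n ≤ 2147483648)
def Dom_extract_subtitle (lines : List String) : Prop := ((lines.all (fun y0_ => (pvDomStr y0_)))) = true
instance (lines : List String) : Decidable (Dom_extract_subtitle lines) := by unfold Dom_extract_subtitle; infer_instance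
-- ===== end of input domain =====

-- B replaces A's running-flag state-machine loop with a find-H1-then-collect two-phase decomposition (simpler; same cost).

-- ===== PORT A =====
-- A's single for-loop, with the flag `found_h1` and accumulator `parts` as loop state; break = return parts.
def pvALoop (rest : List String) (found : Bool) (parts : List String) : List String :=
  match rest with
  | [] => parts
  | line :: rest =>
    if !found && PySem.Str.startswith line "# " then pvALoop rest true parts
    else if found then
      if PySem.Str.startswith line "> " then
        pvALoop rest found (parts ++ [PySem.Str.strip (PySem.Str.slice line (some 2) none)])
      else if !parts.isEmpty then parts
      else if PySem.Str.strip line == "" then pvALoop rest found parts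
      else parts
    else pvALoop rest found parts

def extract_subtitle (lines : List String) : String :=
  PySem.Str.join " " (pvALoop lines false [])

-- ===== PORT B =====
-- Source B's helper: the lines after the first H1 line, or none.
def pvAfterH1 (lines : List String) : Option (List String) :=
  match lines with
  | [] => none
  | l :: rest => if PySem.Str.startswith l "# " then some rest else pvAfterH1 rest

def extract_subtitle_alt (lines : List String) : String :=
  match pvAfterH1 lines with
  | none => ""
  | some rest =>
    let body := (rest.dropWhile (fun l => PySem.Str.strip l == "")).takeWhile
      (fun l => PySem.Str.startswith l "> ")
    PySem.Str.join " " (body.map (fun l => PySem.Str.strip (PySem.Str.slice l (some 2) none)))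

-- ===== PRECONDITION & SPEC =====
def Spec_extract_subtitle (lines : List String) (out : String) : Prop := out = extract_subtitle_alt lines
instance (lines : List String) (out : String) : Decidable (Spec_extract_subtitle lines out) := by unfold Spec_extract_subtitle; infer_instance

-- ===== CLAIM (what is proved, stated in full; the proofs are below) =====
def Claim_equal_extract_subtitle : Prop := ∀ (lines : List String), Dom_extract_subtitle lines → Spec_extract_subtitle lines (extract_subtitle lines)

-- ===== LEMMAS AND PROOFS =====

-- A '> '-prefixed line is not blank after strip.
theorem pv_not_blank_of_quote (l : String) (h : PySem.Str.startswith l "> " = true) :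
    ¬ (PySem.Str.strip l == "") = true := by
  intro hb
  have hb' : (PySem.Str.strip l).toList = [] := by
    have := eq_of_beq hb
    simp [this]
  rw [PySem.Str.toList_strip] at hb'
  have hs : ("> ".toList) <+: l.toList := by
    have : PySem.Chars.startswith l.toList "> ".toList = true := by
      simpa [PySem.Str.startswith_eq] using h
    exact (PySem.Chars.startswith_iff _ _).1 this
  obtain ⟨t, ht⟩ := hs
  have ht' : l.toList = '>' :: ' ' :: t := by simpa using ht.symm
  rw [ht'] at hb'
  have h2 : ∀ x, x ∈ t ∨ x = ' ' ∨ x = '>' → PySem.Chars.isspace x = true := by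
    simpa [PySem.Chars.strip, PySem.Chars.lstrip, PySem.Chars.rstrip, List.dropWhile,
      show PySem.Chars.isspace '>' = false from by decide] using hb'
  have := h2 '>' (by simp)
  exact absurd this (by decide)

-- Once parts is nonempty, A collects exactly the contiguous '> ' run.
theorem pvALoop_collect (rest : List String) (parts : List String) (hne : parts ≠ []) :
    pvALoop rest true parts =
      parts ++ (rest.takeWhile (fun l => PySem.Str.startswith l "> ")).map
        (fun l => PySem.Str.strip (PySem.Str.slice l (some 2) none)) := by
  induction rest generalizing parts with
  | nil => simp [pvALoop]
  | cons line rest ih =>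
    by_cases hp : PySem.Str.startswith line "> " = true
    · have hp2 : PySem.Chars.startswith line.toList ['>', ' '] = true := by simpa using hp
      rw [pvALoop]
      simp [hp2]
      rw [ih _ (by simp)]
      simp
    · have hp2 : ¬ PySem.Chars.startswith line.toList ['>', ' '] = true := by simpa using hp
      rw [pvALoop]
      simp [hp2, List.isEmpty_eq_false_iff.mpr hne]

-- From found=true with empty parts, A skips blanks then collects the '> ' run.
theorem pvALoop_found (rest : List String) :
    pvALoop rest true [] =
      ((rest.dropWhile (fun l => PySem.Str.strip l == "")).takeWhile
        (fun l => PySem.Str.startswith l "> ")).map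
        (fun l => PySem.Str.strip (PySem.Str.slice l (some 2) none)) := by
  induction rest with
  | nil => simp [pvALoop]
  | cons line rest ih =>
    by_cases hp : PySem.Str.startswith line "> " = true
    · have hp2 : PySem.Chars.startswith line.toList ['>', ' '] = true := by simpa using hp
      have hb2 : ¬ PySem.Str.strip line = "" := by
        simpa using pv_not_blank_of_quote line hp
      rw [pvALoop]
      simp [hp2, hb2]
      rw [pvALoop_collect _ _ (by simp)]
      simp
    · have hp2 : ¬ PySem.Chars.startswith line.toList ['>', ' '] = true := by simpa using hp
      by_cases hb : (PySem.Str.strip line == "") = true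
      · have hb2 : PySem.Str.strip line = "" := by simpa using hb
        rw [pvALoop]
        simp [hp2, hb2, ih]
      · have hb2 : ¬ PySem.Str.strip line = "" := by simpa using hb
        rw [pvALoop]
        simp [hp2, hb2]

-- Before the H1 is found, A scans exactly like pvAfterH1.
theorem pvALoop_search (lines : List String) :
    pvALoop lines false [] =
      match pvAfterH1 lines with
      | none => []
      | some rest =>
        ((rest.dropWhile (fun l => PySem.Str.strip l == "")).takeWhile
          (fun l => PySem.Str.startswith l "> ")).map
          (fun l => PySem.Str.strip (PySem.Str.slice l (some 2) none)) := by
  induction lines with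
  | nil => simp [pvALoop, pvAfterH1]
  | cons l rest ih =>
    by_cases hh : PySem.Chars.startswith l.toList ['#', ' '] = true
    · rw [pvALoop, pvAfterH1]
      simp [hh, pvALoop_found]
    · rw [pvALoop, pvAfterH1]
      simp [hh, ih]

-- ===== VERDICT (by name: the statement is the Claim_ definition above) =====
theorem extract_subtitle_spec : Claim_equal_extract_subtitle := by
  intro lines _
  unfold Spec_extract_subtitle extract_subtitle extract_subtitle_alt
  rw [pvALoop_search]
  cases pvAfterH1 lines <;> simp [PySem.Str.join]
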